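-- pv_equiv track=rewrite | github.com/khadidja2005/ramy_AI_API | Controlers/Segmentation/controler.py | process_shelf
-- ===== SOURCE A (Python) =====
-- def process_shelf(shelf_boxes):
--     """Process boxes in a shelf to count products by type."""
--     ramy_count = sum(1 for box in shelf_boxes if box['class_id'] == 0)
--     other_count = sum(1 for box in shelf_boxes if box['class_id'] == 1)
--
--     return {
--         'ramy_count': ramy_count,
--         'other_count': other_count,
--         'total_count': len(shelf_boxes)
--     }
-- ===== SOURCE B (Python) =====
-- def process_shelf(shelf_boxes):
--     """Process boxes in a shelf to count products by type."""
--     ramy = other = total = 0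
--     for box in shelf_boxes:
--         c = box['class_id']
--         if c == 0:
--             ramy += 1
--         elif c == 1:
--             other += 1
--         total += 1
--     return {'ramy_count': ramy, 'other_count': other, 'total_count': total}
-- ===== Notes on version B (the rewrite author's own statement) =====
-- stated objective: idiomatic
-- what changed: Replaces A's two independent generator scans (one per class) plus a len() call by a single loop that maintains all three counters at once.
import Mathlib
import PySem

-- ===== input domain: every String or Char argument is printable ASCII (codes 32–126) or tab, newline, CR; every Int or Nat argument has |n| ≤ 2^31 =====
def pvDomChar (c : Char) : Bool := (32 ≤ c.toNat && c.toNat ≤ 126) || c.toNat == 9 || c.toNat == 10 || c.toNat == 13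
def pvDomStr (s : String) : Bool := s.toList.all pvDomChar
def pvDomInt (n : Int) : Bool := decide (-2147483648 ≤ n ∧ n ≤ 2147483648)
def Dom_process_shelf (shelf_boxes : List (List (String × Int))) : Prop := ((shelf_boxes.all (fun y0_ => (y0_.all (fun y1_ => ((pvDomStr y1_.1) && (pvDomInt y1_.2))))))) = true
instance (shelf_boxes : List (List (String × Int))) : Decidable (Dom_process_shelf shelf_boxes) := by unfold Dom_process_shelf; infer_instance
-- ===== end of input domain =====

-- B replaces A's two independent per-class scans (plus len()) by a single loop maintaining all three counters; return value only, no mutation.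

-- ===== PORT A =====
-- box['class_id'] is a first-match association-list lookup; the getD default is only
-- reachable outside Pre_ (where Python raises KeyError).
def process_shelf (shelf_boxes : List (List (String × Int))) : List (String × Int) :=
  let ramy_count : Int :=
    shelf_boxes.foldl (fun acc box => if (box.lookup "class_id").getD 0 = 0 then acc + 1 else acc) 0
  let other_count : Int :=
    shelf_boxes.foldl (fun acc box => if (box.lookup "class_id").getD 0 = 1 then acc + 1 else acc) 0
  [("ramy_count", ramy_count), ("other_count", other_count), ("total_count", (shelf_boxes.length : Int))]

-- ===== PORT B =====
def process_shelf_alt (shelf_boxes : List (List (String × Int))) : List (String × Int) :=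
  let s : Int × Int × Int :=
    shelf_boxes.foldl
      (fun (st : Int × Int × Int) box =>
        let c := (box.lookup "class_id").getD 0
        (if c = 0 then st.1 + 1 else st.1,
         if c = 1 then st.2.1 + 1 else st.2.1,
         st.2.2 + 1))
      (0, 0, 0)
  [("ramy_count", s.1), ("other_count", s.2.1), ("total_count", s.2.2)]

-- ===== PRECONDITION & SPEC =====
-- Pre_ excludes exactly the boxes without a 'class_id' key, on which Python A raises KeyError.
def Pre_process_shelf (shelf_boxes : List (List (String × Int))) : Prop :=
  (shelf_boxes.all (fun box => (box.lookup "class_id").isSome)) = true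
instance (shelf_boxes : List (List (String × Int))) : Decidable (Pre_process_shelf shelf_boxes) := by unfold Pre_process_shelf; infer_instance
def pvWitness_process_shelf : (List (List (String × Int))) := [[("class_id", 0)], [("class_id", 1)], [("class_id", 2)]]

def Spec_process_shelf (shelf_boxes : List (List (String × Int))) (out : List (String × Int)) : Prop := out = process_shelf_alt shelf_boxes
instance (shelf_boxes : List (List (String × Int))) (out : List (String × Int)) : Decidable (Spec_process_shelf shelf_boxes out) := by unfold Spec_process_shelf; infer_instance

-- ===== CLAIM (what is proved, stated in full; the proofs are below) =====
def Claim_equal_process_shelf : Prop := ∀ (shelf_boxes : List (List (String × Int))), Dom_process_shelf shelf_boxes → Pre_process_shelf shelf_boxes → Spec_process_shelf shelf_boxes (process_shelf shelf_boxes)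

-- ===== LEMMAS AND PROOFS =====

-- B's single fold computes the two class counts and the length, shifted by the accumulator.
theorem pv_fold_triple (l : List (List (String × Int))) (a b t : Int) :
    l.foldl
      (fun (st : Int × Int × Int) box =>
        let c := (box.lookup "class_id").getD 0
        (if c = 0 then st.1 + 1 else st.1,
         if c = 1 then st.2.1 + 1 else st.2.1,
         st.2.2 + 1))
      (a, b, t)
    = (l.foldl (fun acc box => if (box.lookup "class_id").getD 0 = 0 then acc + 1 else acc) a,
       l.foldl (fun acc box => if (box.lookup "class_id").getD 0 = 1 then acc + 1 else acc) b,
       t + (l.length : Int)) := by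
  induction l generalizing a b t with
  | nil => simp
  | cons x xs ih =>
      simp only [List.foldl_cons, List.length_cons, ih]
      refine Prod.ext rfl (Prod.ext rfl ?_)
      push_cast; ring

-- ===== VERDICT (by name: the statement is the Claim_ definition above) =====
theorem process_shelf_spec : Claim_equal_process_shelf := by
  intro shelf_boxes _ _
  unfold Spec_process_shelf process_shelf process_shelf_alt
  rw [pv_fold_triple]
  simp
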